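/- GENERATED by tools/from_farm_form.py from prooffarm-gif/accepted/DGifGetImageDesc.4/Proof.lean (a worked proof of the farm's unit `DGifGetImageDesc.4`,
   accepted by the verdict) — do not edit. -/
import Gif.Spec.Units.DGifGetImageDesc_4
import Gif.Spec.AllSegs
import Gif.Spec.Proved.DGifGetImageDesc_4_Lemmas

open X86 X86.User Asan ProgX.Base ProgX.Base.Spec Gif.Spec

/-!
  `DGifGetImageDesc.4` (0x109503 … 0x109535, 12 instructions; dgif_lib.c:461-462): segment 4 of `DGifGetImageDesc`,
  `sp = &SavedImages[ImageCount]` and `memcpy(&sp->ImageDesc, &gif->Image, 32)` into the UNCOUNTED slot of the array. One checked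
  load, one call: the whole segment is one walk (`d4_walk`, Lemmas.lean), from `Grown` at 0x109503 to `AfterCopy` at 0x109535.
-/

/-- Segment 4 of `DGifGetImageDesc` takes `Grown` at 0x109503 to `AfterCopy` at 0x109535. -/
theorem Gif.Spec.Proved.DGifGetImageDesc_4_ok : Gif.Spec.DGifGetImageDesc_4.Statement := by
  intro Lay hLay μ hμ u₀ hcode h_memcpy h_asan_load4_noabort H rest frames F R e ret Hc Fc v hat
  -- `memcpy` is entered with the PRESENT heap `Hc` and the entry's frames (the function has no protected frame)
  have hcpy := h_memcpy (Hc.liveObjs ++ rest) frames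
  -- 0x109503 … the call of memcpy … 0x109535
  exact Gif.Spec.DGifGetImageDesc_4.d4_walk Lay hLay μ hμ u₀ hcode h_asan_load4_noabort H rest frames F R e ret Hc Fc hcpy v hat
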